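-- pv_equiv track=rewrite | github.com/boranozum/Leet-Code-Solutions | Most Popular Video Creator/solution.py | lexicographicalCompare
-- ===== SOURCE A (Python) =====
-- def lexicographicalCompare(a: str, b: str) -> bool:
--     if len(a) < len(b):
--         return True
--     elif len(a) > len(b):
--         return False
--     else:
--         for i in range(len(a)):
--             if a[i] < b[i]:
--                 return True
--             elif a[i] > b[i]:
--                 return False
--         return False
-- ===== SOURCE B (Python) =====
-- def lexicographicalCompare(a: str, b: str) -> bool:
--     # Single simultaneous walk over both strings; no len() calls.
--     # 'pending' remembers the verdict of the first character mismatch in the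
--     # common prefix; whichever iterator is exhausted first decides by length.
--     ia, ib = iter(a), iter(b)
--     pending = None
--     while True:
--         x = next(ia, None)
--         y = next(ib, None)
--         if x is None and y is None:
--             return pending if pending is not None else False
--         if x is None:
--             return True
--         if y is None:
--             return False
--         if pending is None and x != y:
--             pending = x < y
-- ===== Notes on version B (the rewrite author's own statement) =====
-- stated objective: alternative
-- what changed: Replaces the two len() branches plus an indexed second-pass character loop with one simultaneous walk of both strings via iterators, carrying the first-mismatch verdict as a pending accumulator and deciding length dominance by which iterator exhausts first.
import Mathlib
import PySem

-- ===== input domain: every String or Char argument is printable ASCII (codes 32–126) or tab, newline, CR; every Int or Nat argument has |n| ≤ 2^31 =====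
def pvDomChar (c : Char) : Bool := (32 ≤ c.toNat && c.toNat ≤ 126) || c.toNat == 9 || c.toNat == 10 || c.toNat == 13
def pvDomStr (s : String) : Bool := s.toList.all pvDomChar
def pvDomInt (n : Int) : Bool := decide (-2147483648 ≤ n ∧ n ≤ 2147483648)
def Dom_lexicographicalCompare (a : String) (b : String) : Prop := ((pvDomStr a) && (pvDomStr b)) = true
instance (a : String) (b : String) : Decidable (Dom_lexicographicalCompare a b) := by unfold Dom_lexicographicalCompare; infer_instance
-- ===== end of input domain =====

-- B replaces A's length branches + indexed character loop by one simultaneous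
-- walk of both strings with a pending first-mismatch accumulator; same cost.

-- ===== PORT A =====
-- A's for-loop over i in range(len(a)) comparing a[i] with b[i]; in the branch
-- where it runs len(a) = len(b), so the lockstep index walk is this recursion
-- over the two char lists (exact: same comparisons in the same order).
def lexALoop : List Char → List Char → Bool
  | x :: xs, y :: ys =>
      if x < y then true
      else if x > y then false
      else lexALoop xs ys
  | _, _ => false

def lexicographicalCompare (a : String) (b : String) : Bool :=
  if a.toList.length < b.toList.length then true
  else if a.toList.length > b.toList.length then false
  else lexALoop a.toList b.toList

-- ===== PORT B =====
-- B's while-loop drawing one char from each iterator per step, with the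
-- 'pending' Option Bool accumulator (exact transcription of Source B).
def lexBLoop : List Char → List Char → Option Bool → Bool
  | [], [], pending => pending.getD false
  | [], _ :: _, _ => true
  | _ :: _, [], _ => false
  | x :: xs, y :: ys, pending =>
      lexBLoop xs ys (if pending.isNone && x ≠ y then some (x < y) else pending)

def lexicographicalCompare_alt (a : String) (b : String) : Bool :=
  lexBLoop a.toList b.toList none

-- ===== PRECONDITION & SPEC =====
def Spec_lexicographicalCompare (a : String) (b : String) (out : Bool) : Prop := out = lexicographicalCompare_alt a b
instance (a : String) (b : String) (out : Bool) : Decidable (Spec_lexicographicalCompare a b out) := by unfold Spec_lexicographicalCompare; infer_instance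

-- ===== CLAIM (what is proved, stated in full; the proofs are below) =====
def Claim_equal_lexicographicalCompare : Prop := ∀ (a : String) (b : String), Dom_lexicographicalCompare a b → Spec_lexicographicalCompare a b (lexicographicalCompare a b)

-- ===== LEMMAS AND PROOFS =====
-- Shorter first list makes B's loop return true regardless of the accumulator.
theorem lexBLoop_lt : ∀ (xs ys : List Char) (p : Option Bool),
    xs.length < ys.length → lexBLoop xs ys p = true := by
  intro xs
  induction xs with
  | nil => intro ys p h; cases ys with
    | nil => simp at h
    | cons y ys => rfl
  | cons x xs ih =>
    intro ys p h
    cases ys with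
    | nil => simp at h
    | cons y ys =>
      simp only [List.length_cons, Nat.add_lt_add_iff_right] at h
      exact ih ys _ h

-- Longer first list makes B's loop return false regardless of the accumulator.
theorem lexBLoop_gt : ∀ (xs ys : List Char) (p : Option Bool),
    ys.length < xs.length → lexBLoop xs ys p = false := by
  intro xs
  induction xs with
  | nil => intro ys p h; simp at h
  | cons x xs ih =>
    intro ys p h
    cases ys with
    | nil => rfl
    | cons y ys =>
      simp only [List.length_cons, Nat.add_lt_add_iff_right] at h
      exact ih ys _ h

-- Once a verdict is pending it is never changed, and equal lengths return it.
theorem lexBLoop_some : ∀ (xs ys : List Char) (v : Bool),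
    xs.length = ys.length → lexBLoop xs ys (some v) = v := by
  intro xs
  induction xs with
  | nil => intro ys v h; cases ys with
    | nil => rfl
    | cons y ys => simp at h
  | cons x xs ih =>
    intro ys v h
    cases ys with
    | nil => simp at h
    | cons y ys =>
      simp only [List.length_cons, Nat.add_right_cancel_iff] at h
      simpa [lexBLoop, Option.isNone] using ih ys v h

-- On equal-length lists A's lockstep loop agrees with B's walk started empty.
theorem lexALoop_eq_lexBLoop : ∀ (xs ys : List Char), xs.length = ys.length →
    lexALoop xs ys = lexBLoop xs ys none := by
  intro xs
  induction xs with
  | nil => intro ys h; cases ys with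
    | nil => rfl
    | cons y ys => simp at h
  | cons x xs ih =>
    intro ys h
    cases ys with
    | nil => simp at h
    | cons y ys =>
      simp only [List.length_cons, Nat.add_right_cancel_iff] at h
      by_cases hlt : x < y
      · have hne : x ≠ y := ne_of_lt hlt
        simp [lexALoop, lexBLoop, hlt, hne, lexBLoop_some xs ys _ h]
      · by_cases hgt : x > y
        · have hne : x ≠ y := (ne_of_lt hgt).symm
          simp [lexALoop, lexBLoop, hlt, hgt, hne, lexBLoop_some xs ys _ h]
        · have heq : x = y := le_antisymm (not_lt.mp hgt) (not_lt.mp hlt)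
          subst heq
          simp [lexALoop, lexBLoop, ih ys h]

-- ===== VERDICT (by name: the statement is the Claim_ definition above) =====
theorem lexicographicalCompare_spec : Claim_equal_lexicographicalCompare := by
  unfold Claim_equal_lexicographicalCompare
  intro a b _
  unfold Spec_lexicographicalCompare lexicographicalCompare lexicographicalCompare_alt
  by_cases h1 : a.toList.length < b.toList.length
  · rw [if_pos h1, lexBLoop_lt a.toList b.toList none h1]
  · by_cases h2 : b.toList.length < a.toList.length
    · rw [if_neg h1, if_pos h2, lexBLoop_gt a.toList b.toList none h2]
    · have he : a.toList.length = b.toList.length := by omega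
      rw [if_neg h1, if_neg h2, lexALoop_eq_lexBLoop a.toList b.toList he]
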